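-- pv_equiv track=rewrite | github.com/mweinberg/stratum-speed-test | verify_pool.py | bech32_decode_simple
-- ===== SOURCE A (Python) =====
-- from typing import Optional, Tuple, Dict, List
--
-- def bech32_decode_simple(address: str) -> Optional[str]:
--     """
--     Simple bech32 decoder to extract witness program.
--     Returns hex of witness program or None.
--     """
--     try:
--         # Bech32 character set
--         charset = "qpzry9x8gf2tvdw0s3jn54khce6mua7l"
--
--         # Remove prefix
--         if not address.lower().startswith('bc1'):
--             return None
--
--         data_part = address[3:].lower()
--
--         # Decode bech32 (simplified - just get the data)
--         values = []
--         for c in data_part[:-6]:  # Exclude checksum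
--             if c in charset:
--                 values.append(charset.index(c))
--
--         # Convert from 5-bit to 8-bit
--         bits = 0
--         value = 0
--         result = []
--
--         for v in values[1:]:  # Skip witness version
--             value = (value << 5) | v
--             bits += 5
--
--             if bits >= 8:
--                 bits -= 8
--                 result.append((value >> bits) & 0xff)
--                 value &= (1 << bits) - 1
--
--         return bytes(result).hex()
--
--     except:
--         return None
-- ===== SOURCE B (Python) =====
-- def bech32_decode_simple(address):
--     """
--     Simple bech32 decoder to extract witness program.
--     Returns hex of witness program or None.
--     """
--     charset = "qpzry9x8gf2tvdw0s3jn54khce6mua7l"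
--     if not address.lower().startswith('bc1'):
--         return None
--     data_part = address[3:].lower()
--     values = [charset.index(c) for c in data_part[:-6] if c in charset]
--     rest = values[1:]
--     acc = 0
--     for v in rest:
--         acc = (acc << 5) | v
--     n = len(rest)
--     nbytes = (5 * n) // 8
--     acc >>= 5 * n - 8 * nbytes
--     return acc.to_bytes(nbytes, 'big').hex()
-- ===== Notes on version B (the rewrite author's own statement) =====
-- stated objective: alternative
-- what changed: B replaces A's streaming per-step 5-to-8-bit regrouping (mask-and-append one byte at a time with leftover-bit bookkeeping) by accumulating all 5-bit groups into one big integer, right-shifting off the leftover bits once, and emitting all bytes at once via int.to_bytes().hex(); the charset filter becomes a comprehension.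
import Mathlib
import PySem

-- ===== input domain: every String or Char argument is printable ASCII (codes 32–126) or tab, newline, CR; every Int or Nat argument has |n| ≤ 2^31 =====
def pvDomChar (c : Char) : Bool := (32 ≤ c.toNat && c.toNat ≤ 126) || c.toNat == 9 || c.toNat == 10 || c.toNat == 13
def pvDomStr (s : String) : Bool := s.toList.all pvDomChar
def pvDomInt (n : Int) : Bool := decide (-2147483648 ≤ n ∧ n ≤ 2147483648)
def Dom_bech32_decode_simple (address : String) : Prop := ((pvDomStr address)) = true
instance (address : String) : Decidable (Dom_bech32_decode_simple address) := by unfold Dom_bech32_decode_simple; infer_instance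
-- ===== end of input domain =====

-- B replaces A's per-step byte masking with one big-integer accumulation sliced once at the end (objective: alternative decomposition, same cost).
-- Shared constant: the bech32 charset.
def pvCharset : List Char := "qpzry9x8gf2tvdw0s3jn54khce6mua7l".toList

-- bytes(...).hex(): two lowercase hex digits per byte (shared by both ports, as both Pythons call .hex()).
def pvHexDigit (n : Nat) : Char := "0123456789abcdef".toList.getD n '0'
def pvHex (bs : List Nat) : String := String.ofList (bs.flatMap (fun b => [pvHexDigit (b / 16), pvHexDigit (b % 16)]))

-- ===== PORT A =====
-- loop body of A's 5-bit → 8-bit regrouping; Nat arithmetic is exact here: every Python int involved is nonnegative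
def pvStepA (s : Nat × Nat × List Nat) (v : Nat) : Nat × Nat × List Nat :=
  let bits := s.1 + 5
  let value := (s.2.1 <<< 5) ||| v
  if bits ≥ 8 then
    (bits - 8, value &&& ((1 <<< (bits - 8)) - 1), s.2.2 ++ [(value >>> (bits - 8)) &&& 0xff])
  else (bits, value, s.2.2)

def bech32_decode_simple (address : String) : Option String :=
  if ¬ (PySem.Chars.startswith (PySem.Chars.lower address.toList) "bc1".toList) then none
  else
    let data_part := PySem.Chars.lower (PySem.List.slice address.toList (some 3) none)
    let values := (PySem.List.slice data_part none (some (-6))).foldl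
      (fun (vs : List Nat) c =>
        if PySem.Chars.isIn [c] pvCharset then vs ++ [(PySem.Chars.find pvCharset [c]).toNat] else vs) []
    let st := (PySem.List.slice values (some 1) none).foldl pvStepA (0, 0, ([] : List Nat))
    some (pvHex st.2.2)

-- ===== PORT B =====
-- int.to_bytes(k, 'big') (exact for x < 256^k, which B guarantees by the right-shift)
def pvToBytesBE : Nat → Nat → List Nat
  | 0, _ => []
  | k + 1, x => pvToBytesBE k (x / 256) ++ [x % 256]

def bech32_decode_simple_alt (address : String) : Option String :=
  if ¬ (PySem.Chars.startswith (PySem.Chars.lower address.toList) "bc1".toList) then none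
  else
    let data_part := PySem.Chars.lower (PySem.List.slice address.toList (some 3) none)
    let values := ((PySem.List.slice data_part none (some (-6))).filter
        (fun c => PySem.Chars.isIn [c] pvCharset)).map
        (fun c => (PySem.Chars.find pvCharset [c]).toNat)
    let rest := PySem.List.slice values (some 1) none
    let acc := rest.foldl (fun a v => (a <<< 5) ||| v) 0
    let n := rest.length
    let nbytes := 5 * n / 8
    some (pvHex (pvToBytesBE nbytes (acc >>> (5 * n - 8 * nbytes))))

-- ===== PRECONDITION & SPEC =====
def Spec_bech32_decode_simple (address : String) (out : Option String) : Prop := out = bech32_decode_simple_alt address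
instance (address : String) (out : Option String) : Decidable (Spec_bech32_decode_simple address out) := by unfold Spec_bech32_decode_simple; infer_instance

-- ===== CLAIM (what is proved, stated in full; the proofs are below) =====
def Claim_equal_bech32_decode_simple : Prop := ∀ (address : String), Dom_bech32_decode_simple address → Spec_bech32_decode_simple address (bech32_decode_simple address)

-- ===== LEMMAS AND PROOFS =====

lemma pv_find_lt (c : Char) (h : PySem.Chars.isIn [c] pvCharset = true) :
    (PySem.Chars.find pvCharset [c]).toNat < 32 := by
  have hn : 0 ≤ PySem.Chars.find pvCharset [c] :=
    (PySem.Chars.find_nonneg_iff pvCharset [c]).2 ((PySem.Chars.isIn_iff_infix [c] pvCharset).1 h)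
  have hs := (PySem.Chars.find_spec hn).1
  have hlt : (PySem.Chars.find pvCharset [c]).toNat < pvCharset.length := by
    by_contra hge
    rw [List.drop_eq_nil_of_le (by omega)] at hs
    simp at hs
  simpa [pvCharset] using hlt

lemma pv_or_eq_add (a v : Nat) (hv : v < 32) : (a <<< 5) ||| v = a * 32 + v := by
  rw [← Nat.shiftLeft_add_eq_or_of_lt (b := v) hv a, Nat.shiftLeft_eq]
lemma pv_key1 (a v b : Nat) (hv : v < 32) : (a % 2 ^ b) * 32 + v = (a * 32 + v) % 2 ^ (b + 5) := by
  have h2 : (2:Nat) ^ (b+5) = 2^b * 32 := by ring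
  have hd : a * 32 + v = (2^b * 32) * (a / 2^b) + (a % 2^b * 32 + v) := by
    conv_lhs => rw [show a = 2^b * (a / 2^b) + a % 2^b from by rw [Nat.div_add_mod]]
    ring
  have hlt : a % 2^b * 32 + v < 2^b * 32 := by
    have := Nat.mod_lt a (show 0 < 2^b from by positivity)
    omega
  rw [h2, hd, Nat.mul_add_mod_self_left, Nat.mod_eq_of_lt hlt]
lemma pv_key2 (a v b : Nat) (hv : v < 32) : (a * 32 + v) / 2 ^ (b + 5) = a / 2 ^ b := by
  have h2 : (2:Nat) ^ (b+5) = 32 * 2^b := by ring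
  rw [h2, ← Nat.div_div_eq_div_mul, Nat.mul_comm a 32, Nat.mul_add_div (by norm_num), Nat.div_eq_of_lt hv, Nat.add_zero]

lemma pv_main (vs : List Nat) (h : ∀ v ∈ vs, v < 32) :
    vs.foldl pvStepA (0, 0, ([] : List Nat)) =
      ((5 * vs.length) % 8,
       (vs.foldl (fun a v => a * 32 + v) 0) % 2 ^ ((5 * vs.length) % 8),
       pvToBytesBE (5 * vs.length / 8) ((vs.foldl (fun a v => a * 32 + v) 0) / 2 ^ ((5 * vs.length) % 8))) := by
  induction vs using List.reverseRecOn with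
  | nil => simp [pvToBytesBE]
  | append_singleton vs v ih =>
    have hv : v < 32 := h v (by simp)
    rw [List.foldl_append, List.foldl_append, ih (fun x hx => h x (by simp [hx]))]
    set L := vs.length with hL
    set a := vs.foldl (fun a v => a * 32 + v) 0 with ha
    simp only [List.foldl_cons, List.foldl_nil, List.length_append, List.length_cons,
      List.length_nil, Nat.zero_add]
    set b := 5 * L % 8 with hb
    set q := 5 * L / 8 with hq
    have hdm : 8 * q + b = 5 * L := by rw [hb, hq]; omega
    have hblt : b < 8 := by omega
    unfold pvStepA
    simp only [pv_or_eq_add _ v hv, pv_key1 a v b hv]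
    by_cases hc : b + 5 ≥ 8
    · rw [if_pos hc]
      have e1 : 5 * (L + 1) % 8 = b - 3 := by omega
      have e2 : 5 * (L + 1) / 8 = q + 1 := by omega
      have epow : (2:Nat) ^ (b + 5) = 2 ^ (b - 3) * 256 := by
        rw [show b + 5 = (b - 3) + 8 from by omega, pow_add]; norm_num
      have hmask : (a * 32 + v) % 2 ^ (b + 5) &&& (1 <<< (b + 5 - 8) - 1)
          = (a * 32 + v) % 2 ^ (b - 3) := by
        rw [Nat.one_shiftLeft, show b + 5 - 8 = b - 3 from by omega,
          Nat.and_two_pow_sub_one_eq_mod,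
          Nat.mod_mod_of_dvd _ (pow_dvd_pow 2 (show b - 3 ≤ b + 5 from by omega))]
      have hbyte : ((a * 32 + v) % 2 ^ (b + 5)) >>> (b + 5 - 8) &&& 255
          = (a * 32 + v) / 2 ^ (b - 3) % 256 := by
        rw [Nat.shiftRight_eq_div_pow, show b + 5 - 8 = b - 3 from by omega,
          show (255 : Nat) = 2 ^ 8 - 1 from rfl, Nat.and_two_pow_sub_one_eq_mod,
          epow, Nat.mod_mul_right_div_self]
        norm_num [Nat.mod_mod_of_dvd]
      have hdiv : (a * 32 + v) / 2 ^ (b - 3) / 256 = a / 2 ^ b := by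
        rw [Nat.div_div_eq_div_mul, ← epow, pv_key2 a v b hv]
      rw [hmask, hbyte, e1, e2, pvToBytesBE, hdiv, show b + 5 - 8 = b - 3 from by omega]
    · rw [if_neg hc]
      have e1 : 5 * (L + 1) % 8 = b + 5 := by omega
      have e2 : 5 * (L + 1) / 8 = q := by omega
      rw [e1, e2, pv_key2 a v b hv]

-- ===== VERDICT (by name: the statement is the Claim_ definition above) =====
theorem bech32_decode_simple_spec : Claim_equal_bech32_decode_simple := by
  intro address _
  unfold Spec_bech32_decode_simple bech32_decode_simple bech32_decode_simple_alt
  by_cases hpre : PySem.Chars.startswith (PySem.Chars.lower address.toList) "bc1".toList = true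
  · simp only [hpre, not_true, if_false]
    rw [PySem.List.foldl_append_if]
    simp only [List.nil_append]
    set values := ((PySem.List.slice (PySem.Chars.lower (PySem.List.slice address.toList (some 3) none)) none
        (some (-6))).filter (fun c => PySem.Chars.isIn [c] pvCharset)).map
        (fun c => (PySem.Chars.find pvCharset [c]).toNat) with hvals
    set rest := PySem.List.slice values (some 1) none with hrest
    have hsmall : ∀ v ∈ rest, v < 32 := by
      intro v hvmem
      have hvv : v ∈ values := by
        rw [hrest, PySem.List.slice_from_one] at hvmem
        exact List.mem_of_mem_tail hvmem
      rw [hvals] at hvv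
      obtain ⟨c, hc, rfl⟩ := List.mem_map.1 hvv
      exact pv_find_lt c (List.mem_filter.1 hc).2
    have hacc : rest.foldl (fun a v => (a <<< 5) ||| v) 0 = rest.foldl (fun a v => a * 32 + v) 0 :=
      PySem.List.foldl_congr_mem _ _ _ _ (fun acc x hx => pv_or_eq_add acc x (hsmall x hx))
    rw [pv_main rest hsmall, hacc, Nat.shiftRight_eq_div_pow,
      show 5 * rest.length - 8 * (5 * rest.length / 8) = 5 * rest.length % 8 from by omega]
  · rw [if_pos (by simpa using hpre), if_pos (by simpa using hpre)]
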